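-- pv_equiv track=rewrite | github.com/ngopaul/markdown-outliner | outlineize.py | get_outline_formatted_strings
-- ===== SOURCE A (Python) =====
-- position_to_header_mapping = {
--     0: "###",
--     1: "####"
-- }
--
-- def get_outline_formatted_strings(order, full_repr=True) -> (str, str):
--     """
--     Given an order, print what it should look like in the final output
--     :param order: list, something like [1, 2, 1, 0, 0, 0]
--     :param full_repr: bool, whether to include . and () in both the outline_formatted_numeral and the last_added_order.
--         That is, A. and (1) vs. A and 1
--     :return:
--         outline_formatted_numeral (e.g. ### [1A], which would be ### [1A.] if full_repr is True),
--         last_added_order (e.g. A, which would be A. if full_repr is True)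
--     """
--     # Get the highest non-zero index
--     pos = next((index - 1 for index, val in enumerate(order) if val == 0), len(order) - 1)
--     result = f"{str(order[0])}"  # immediately add the digit value of the roman to the beginning, since it is guaranteed
--     # to be there
--     last_added_order = result
--     prefix = ""
--
--     # special handling for high level positions, become headers
--     if pos in position_to_header_mapping:
--         prefix = position_to_header_mapping[pos] + " "
--
--     wrap_start = ("(" if full_repr else "")
--     wrap_end = (")" if full_repr else "")
--     suffix = ("." if full_repr else "")
--
--     if pos > 0:
--         last_added_order = chr(order[1] % 26 + 64) + suffix  # Uppercase letters: A. B.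
--         result += last_added_order
--     if pos > 1:
--         last_added_order = str(order[2]) + suffix  # 1. 2.
--         result += last_added_order
--     if pos > 2:
--         last_added_order = chr(order[3] % 26 + 96) + suffix  # Lowercase letters: a. b.
--         result += last_added_order
--     if pos > 3:
--         last_added_order = f"{wrap_start}{order[4]}{wrap_end}"  # (1) (2)
--         result += last_added_order
--     if pos > 4:
--         last_added_order = f"{wrap_start}{chr(order[3] % 26 + 96)}{wrap_end}"  # (a) (b)
--         result += last_added_order
--     return f"{prefix}[{result}]", last_added_order
-- ===== SOURCE B (Python) =====
-- position_to_header_mapping = {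
--     0: "###",
--     1: "####"
-- }
--
-- def get_outline_formatted_strings(order, full_repr=True) -> (str, str):
--     # depth of the outline: index before the first 0, or the last index if no 0
--     try:
--         pos = order.index(0) - 1
--     except ValueError:
--         pos = len(order) - 1
--
--     def piece(level):
--         if level == 0:
--             return str(order[0])
--         dot = "." if full_repr else ""
--         if level == 1:
--             return chr(order[1] % 26 + 64) + dot
--         if level == 2:
--             return str(order[2]) + dot
--         if level == 3:
--             return chr(order[3] % 26 + 96) + dot
--         core = str(order[4]) if level == 4 else chr(order[3] % 26 + 96)
--         return "(" + core + ")" if full_repr else core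
--
--     def build(level):
--         # (concatenation of pieces 0..level, piece at level), by recursion on level
--         p = piece(level)
--         return (p, p) if level == 0 else (build(level - 1)[0] + p, p)
--
--     body, last = build(min(max(pos, 0), 5))
--     header = position_to_header_mapping.get(pos)
--     prefix = header + " " if header is not None else ""
--     return f"{prefix}[{body}]", last
-- ===== Notes on version B (the rewrite author's own statement) =====
-- stated objective: alternative
-- what changed: Replaces A's imperative chain of five guarded if-blocks mutating (result, last_added_order) with a recursive decomposition: pos is found via list.index inside try/except instead of a generator with next, and the output is built top-down by a recursive build(level) returning (concatenation of pieces up to that level, piece at that level) for a clamped depth.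
import Mathlib
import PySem

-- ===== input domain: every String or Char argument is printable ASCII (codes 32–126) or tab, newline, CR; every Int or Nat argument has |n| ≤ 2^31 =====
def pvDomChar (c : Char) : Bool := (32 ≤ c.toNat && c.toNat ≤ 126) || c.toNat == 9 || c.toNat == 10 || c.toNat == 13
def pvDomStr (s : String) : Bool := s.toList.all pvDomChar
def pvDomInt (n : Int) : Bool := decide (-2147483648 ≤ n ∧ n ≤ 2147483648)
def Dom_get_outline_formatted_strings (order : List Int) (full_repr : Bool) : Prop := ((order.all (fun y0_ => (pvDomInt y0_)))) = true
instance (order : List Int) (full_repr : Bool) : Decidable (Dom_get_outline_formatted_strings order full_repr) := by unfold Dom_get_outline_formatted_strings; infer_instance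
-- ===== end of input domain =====

-- B rebuilds the output by recursion on the clamped outline depth (pos found via list.index)
-- instead of A's chain of five guarded if-blocks mutating two accumulators (objective: alternative decomposition; same cost).

-- ===== PORT A =====
-- the `pos = next((index - 1 for ...), len(order) - 1)` line of A
def pvFindZero : List Int → Int → Option Int
  | [], _ => none
  | x :: xs, i => if x = 0 then some i else pvFindZero xs (i + 1)

def pvPos (order : List Int) : Int :=
  match pvFindZero order 0 with
  | some i => i - 1
  | none => (order.length : Int) - 1

def pvHeaderMap : PySem.Dict Int String := PySem.Dict.ofList [(0, "###"), (1, "####")]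

-- everything after `pos` is computed, as a function of pos (accesses order[i] via pyGetD;
-- inside Pre_ every access Python performs is in range, so the default 0 is never used)
def pvABody (order : List Int) (full_repr : Bool) (pos : Int) : String × String :=
  let result := PySem.Int.toStr (PySem.List.pyGetD order 0 0)
  let last_added_order := result
  let pfx := match pvHeaderMap.get? pos with
    | some h => h ++ " "
    | none => ""
  let wrap_start := if full_repr then "(" else ""
  let wrap_end := if full_repr then ")" else ""
  let suffix := if full_repr then "." else ""
  let (result, last_added_order) :=
    if pos > 0 then
      let l := String.ofList [Char.ofNat (PySem.Int.mod (PySem.List.pyGetD order 1 0) 26 + 64).toNat] ++ suffix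
      (result ++ l, l)
    else (result, last_added_order)
  let (result, last_added_order) :=
    if pos > 1 then
      let l := PySem.Int.toStr (PySem.List.pyGetD order 2 0) ++ suffix
      (result ++ l, l)
    else (result, last_added_order)
  let (result, last_added_order) :=
    if pos > 2 then
      let l := String.ofList [Char.ofNat (PySem.Int.mod (PySem.List.pyGetD order 3 0) 26 + 96).toNat] ++ suffix
      (result ++ l, l)
    else (result, last_added_order)
  let (result, last_added_order) :=
    if pos > 3 then
      let l := wrap_start ++ PySem.Int.toStr (PySem.List.pyGetD order 4 0) ++ wrap_end
      (result ++ l, l)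
    else (result, last_added_order)
  let (result, last_added_order) :=
    if pos > 4 then
      let l := wrap_start ++ String.ofList [Char.ofNat (PySem.Int.mod (PySem.List.pyGetD order 3 0) 26 + 96).toNat] ++ wrap_end
      (result ++ l, l)
    else (result, last_added_order)
  (pfx ++ "[" ++ result ++ "]", last_added_order)

def get_outline_formatted_strings (order : List Int) (full_repr : Bool) : String × String :=
  pvABody order full_repr (pvPos order)

-- ===== PORT B =====
-- Source B's `piece(level)`
def pvPieceB (order : List Int) (full_repr : Bool) (level : Nat) : String :=
  if level = 0 then PySem.Int.toStr (PySem.List.pyGetD order 0 0)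
  else
    let dot := if full_repr then "." else ""
    if level = 1 then String.ofList [Char.ofNat (PySem.Int.mod (PySem.List.pyGetD order 1 0) 26 + 64).toNat] ++ dot
    else if level = 2 then PySem.Int.toStr (PySem.List.pyGetD order 2 0) ++ dot
    else if level = 3 then String.ofList [Char.ofNat (PySem.Int.mod (PySem.List.pyGetD order 3 0) 26 + 96).toNat] ++ dot
    else
      let core := if level = 4 then PySem.Int.toStr (PySem.List.pyGetD order 4 0)
                  else String.ofList [Char.ofNat (PySem.Int.mod (PySem.List.pyGetD order 3 0) 26 + 96).toNat]
      if full_repr then "(" ++ core ++ ")" else core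

-- Source B's recursive `build(level)`
def pvBuild (order : List Int) (full_repr : Bool) : Nat → String × String
  | 0 => let p := pvPieceB order full_repr 0; (p, p)
  | l + 1 => let p := pvPieceB order full_repr (l + 1); ((pvBuild order full_repr l).1 ++ p, p)

def get_outline_formatted_strings_alt (order : List Int) (full_repr : Bool) : String × String :=
  let pos : Int := match PySem.List.index? order 0 with
    | some i => (i : Int) - 1
    | none => (order.length : Int) - 1
  let res := pvBuild order full_repr (min (max pos 0) 5).toNat
  let pfx := match pvHeaderMap.get? pos with
    | some h => h ++ " "
    | none => ""
  (pfx ++ "[" ++ res.1 ++ "]", res.2)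

-- ===== PRECONDITION & SPEC =====
-- Pre_ excludes only the empty list, on which Python A raises IndexError reading the first element
def Pre_get_outline_formatted_strings (order : List Int) (full_repr : Bool) : Prop := order ≠ []
instance (order : List Int) (full_repr : Bool) : Decidable (Pre_get_outline_formatted_strings order full_repr) := by unfold Pre_get_outline_formatted_strings; infer_instance
def pvWitness_get_outline_formatted_strings : List Int × Bool := ([1, 2, 1, 0, 0, 0], true)

def Spec_get_outline_formatted_strings (order : List Int) (full_repr : Bool) (out : String × String) : Prop := out = get_outline_formatted_strings_alt order full_repr
instance (order : List Int) (full_repr : Bool) (out : String × String) : Decidable (Spec_get_outline_formatted_strings order full_repr out) := by unfold Spec_get_outline_formatted_strings; infer_instance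

-- ===== CLAIM (what is proved, stated in full; the proofs are below) =====
def Claim_equal_get_outline_formatted_strings : Prop := ∀ (order : List Int) (full_repr : Bool), Dom_get_outline_formatted_strings order full_repr → Pre_get_outline_formatted_strings order full_repr → Spec_get_outline_formatted_strings order full_repr (get_outline_formatted_strings order full_repr)

-- ===== LEMMAS AND PROOFS =====

lemma pvHeaderMap_eq : pvHeaderMap = PySem.Dict.mk [(0, "###"), (1, "####")] := by decide

lemma pvHeader_get (p : Int) : pvHeaderMap.get? p =
    if p = 0 then some "###" else if p = 1 then some "####" else none := by
  rw [pvHeaderMap_eq]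
  simp only [PySem.Dict.get?_mk_cons]
  by_cases h0 : p = 0
  · simp [h0]
  · by_cases h1 : p = 1
    · simp [h0, h1]
    · simp [Ne.symm h0, Ne.symm h1, PySem.Dict.get?, h0, h1]

lemma pvFindZero_index (xs : List Int) (i : Int) :
    pvFindZero xs i = (PySem.List.index? xs 0).map (fun k => i + (k : Int)) := by
  induction xs generalizing i with
  | nil => simp [pvFindZero, PySem.List.index?_eq_idxOf?, List.idxOf?]
  | cons x xs ih =>
    by_cases hx : x = 0
    · subst hx
      simp [pvFindZero, PySem.List.index?_eq_idxOf?, List.idxOf?_cons]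
    · simp only [pvFindZero, if_neg hx, ih (i + 1), PySem.List.index?_eq_idxOf?,
        List.idxOf?_cons, beq_iff_eq, if_neg hx]
      cases List.idxOf? 0 xs <;> simp <;> ring

lemma pvPos_eq (order : List Int) :
    pvPos order = (match PySem.List.index? order 0 with
      | some i => (i : Int) - 1
      | none => (order.length : Int) - 1) := by
  unfold pvPos
  rw [pvFindZero_index]
  cases PySem.List.index? order 0 <;> simp <;> ring

lemma pvBody_eq (order : List Int) (full_repr : Bool) (pos : Int) :
    pvABody order full_repr pos =
      (let res := pvBuild order full_repr (min (max pos 0) 5).toNat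
       let pfx := match pvHeaderMap.get? pos with
         | some h => h ++ " "
         | none => ""
       (pfx ++ "[" ++ res.1 ++ "]", res.2)) := by
  unfold pvABody
  by_cases hn : pos ≤ 0
  · rw [show (min (max pos 0) 5).toNat = 0 by omega]
    simp [pvBuild, pvPieceB, show ¬ pos > 0 by omega, show ¬ pos > 1 by omega,
      show ¬ pos > 2 by omega, show ¬ pos > 3 by omega, show ¬ pos > 4 by omega]
  · by_cases h1 : pos = 1
    · subst h1
      cases full_repr <;> simp [pvBuild, pvPieceB]
    · by_cases h2 : pos = 2
      · subst h2
        rw [show (min (max (2:Int) 0) 5).toNat = 2 by omega]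
        cases full_repr <;> simp [pvBuild, pvPieceB, pvHeader_get]
      · by_cases h3 : pos = 3
        · subst h3
          rw [show (min (max (3:Int) 0) 5).toNat = 3 by omega]
          cases full_repr <;> simp [pvBuild, pvPieceB, pvHeader_get]
        · by_cases h4 : pos = 4
          · subst h4
            rw [show (min (max (4:Int) 0) 5).toNat = 4 by omega]
            cases full_repr <;> simp [pvBuild, pvPieceB, pvHeader_get]
          · have h5 : 5 ≤ pos := by omega
            rw [show (min (max pos 0) 5).toNat = 5 by omega]
            cases full_repr <;>
              simp [pvBuild, pvPieceB, pvHeader_get, show pos ≠ 0 by omega, show pos ≠ 1 by omega,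
                show pos > 0 by omega, show pos > 1 by omega, show pos > 2 by omega,
                show pos > 3 by omega, show pos > 4 by omega]

-- ===== VERDICT (by name: the statement is the Claim_ definition above) =====
theorem get_outline_formatted_strings_spec : Claim_equal_get_outline_formatted_strings := by
  intro order full_repr _ _
  unfold Spec_get_outline_formatted_strings get_outline_formatted_strings get_outline_formatted_strings_alt
  rw [pvBody_eq, pvPos_eq]
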